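-- pv_equiv track=rewrite | github.com/Paullllllllllllllllll/AutoExcerpter | core/page_numbering.py | _get_primary_section_type
-- ===== SOURCE A (Python) =====
-- from typing import Any, Dict, List, Optional, Tuple
--
-- def _get_primary_section_type(page_types: List[str]) -> str:
--     """
--     Get the primary section type for a page.
--
--     Any page containing "content" in its page_types is treated as a content page
--     for page numbering and section ordering purposes. This ensures content pages
--     share the same anchor even if they have multiple type classifications.
--
--     Priority order: content > preface > abstract > appendix > figures_tables_sources
--
--     Args:
--         page_types: List of page type classifications.
--
--     Returns:
--         Primary section type string.
--     """
--     # Content takes absolute priority - any page with "content" is a content page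
--     if "content" in page_types:
--         return "content"
--
--     # For non-content pages, use priority order
--     priority_order = ["preface", "abstract", "appendix", "figures_tables_sources"]
--     for section in priority_order:
--         if section in page_types:
--             return section
--     return page_types[0] if page_types else "content"
-- ===== SOURCE B (Python) =====
-- def _get_primary_section_type(page_types):
--     """Pick the primary section type via a rank table and one pass over the input."""
--     rank = {
--         "content": 0,
--         "preface": 1,
--         "abstract": 2,
--         "appendix": 3,
--         "figures_tables_sources": 4,
--     }
--     names = ["content", "preface", "abstract", "appendix", "figures_tables_sources"]
--     best = 5  # 5 = no known type seen
--     for t in page_types: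
--         best = min(best, rank.get(t, 5))
--     if best < 5:
--         return names[best]
--     return page_types[0] if page_types else "content"
-- ===== Notes on version B (the rewrite author's own statement) =====
-- stated objective: alternative
-- what changed: Replaces the membership tests over the fixed priority list with a single pass over page_types that tracks the minimal rank from a lookup table, then maps the rank back to its name.
import Mathlib
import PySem

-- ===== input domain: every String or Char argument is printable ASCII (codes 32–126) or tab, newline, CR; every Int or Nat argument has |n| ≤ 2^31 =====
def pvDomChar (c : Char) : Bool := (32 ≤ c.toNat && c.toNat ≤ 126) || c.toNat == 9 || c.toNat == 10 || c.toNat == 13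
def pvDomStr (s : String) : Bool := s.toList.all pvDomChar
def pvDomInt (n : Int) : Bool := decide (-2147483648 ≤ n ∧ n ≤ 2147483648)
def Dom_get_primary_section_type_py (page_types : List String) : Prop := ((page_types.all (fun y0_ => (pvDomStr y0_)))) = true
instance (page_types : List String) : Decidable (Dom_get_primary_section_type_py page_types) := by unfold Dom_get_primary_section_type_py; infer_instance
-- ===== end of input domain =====

-- B replaces A's membership tests over the fixed priority list with one pass over the
-- input tracking the minimal rank from a lookup table (objective: alternative).


-- ===== PORT A =====
-- the for-loop over priority_order with early return
def pvLoopA (prio : List String) (page_types : List String) : String :=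
  match prio with
  | [] => match page_types with
          | [] => "content"
          | x :: _ => x
  | s :: rest => if page_types.contains s then s else pvLoopA rest page_types

def get_primary_section_type_py (page_types : List String) : String :=
  if page_types.contains "content" then "content"
  else pvLoopA ["preface", "abstract", "appendix", "figures_tables_sources"] page_types

-- ===== PORT B =====
def pvRank : PySem.Dict String Int :=
  PySem.Dict.ofList [("content", 0), ("preface", 1), ("abstract", 2),
                     ("appendix", 3), ("figures_tables_sources", 4)]

def pvNames : List String :=
  ["content", "preface", "abstract", "appendix", "figures_tables_sources"]

-- rank.get(t, 5)
def pvRnk (t : String) : Int := pvRank.getD t 5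

def get_primary_section_type_py_alt (page_types : List String) : String :=
  let best := page_types.foldl (fun best t => min best (pvRnk t)) 5
  if best < 5 then
    -- names[best]: the index is proved in range (0 ≤ best < 5), so getD never defaults
    (PySem.List.pyGet? pvNames best).getD ""
  else
    match page_types with
    | [] => "content"
    | x :: _ => x

-- ===== PRECONDITION & SPEC =====
def Spec_get_primary_section_type_py (page_types : List String) (out : String) : Prop := out = get_primary_section_type_py_alt page_types
instance (page_types : List String) (out : String) : Decidable (Spec_get_primary_section_type_py page_types out) := by unfold Spec_get_primary_section_type_py; infer_instance

-- ===== CLAIM (what is proved, stated in full; the proofs are below) =====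
def Claim_equal_get_primary_section_type_py : Prop := ∀ (page_types : List String), Dom_get_primary_section_type_py page_types → Spec_get_primary_section_type_py page_types (get_primary_section_type_py page_types)

-- ===== LEMMAS AND PROOFS =====

theorem pvRnk_eq (t : String) :
    pvRnk t = if t = "content" then 0 else if t = "preface" then 1 else
              if t = "abstract" then 2 else if t = "appendix" then 3 else
              if t = "figures_tables_sources" then 4 else 5 := by
  by_cases h1 : t = "content"
  · subst h1; decide
  by_cases h2 : t = "preface"
  · subst h2; decide
  by_cases h3 : t = "abstract"
  · subst h3; decide
  by_cases h4 : t = "appendix"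
  · subst h4; decide
  by_cases h5 : t = "figures_tables_sources"
  · subst h5; decide
  have hr : pvRank = PySem.Dict.mk [("content", 0), ("preface", 1), ("abstract", 2),
                     ("appendix", 3), ("figures_tables_sources", 4)] := by decide
  rw [pvRnk, hr]
  simp [PySem.Dict.getD, PySem.Dict.get?, beq_iff_eq,
        Ne.symm h1, Ne.symm h2, Ne.symm h3, Ne.symm h4, Ne.symm h5, h1, h2, h3, h4, h5]

theorem pvRnk_nonneg (t : String) : 0 ≤ pvRnk t := by
  rw [pvRnk_eq]; split_ifs <;> norm_num

-- the fold never goes below a common lower bound of the start and all ranks seen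
theorem pvFold_lb (l : List String) (b k : Int) (hb : k ≤ b)
    (h : ∀ t ∈ l, k ≤ pvRnk t) :
    k ≤ l.foldl (fun b t => min b (pvRnk t)) b := by
  induction l generalizing b with
  | nil => exact hb
  | cons x xs ih =>
      simp only [List.foldl_cons]
      exact ih _ (le_min hb (h x (by simp))) (fun t ht => h t (by simp [ht]))

theorem pvFold_le_init (l : List String) (b : Int) :
    l.foldl (fun b t => min b (pvRnk t)) b ≤ b := by
  induction l generalizing b with
  | nil => simp
  | cons x xs ih =>
      simp only [List.foldl_cons]
      exact le_trans (ih _) (min_le_left _ _)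

theorem pvFold_le_mem (l : List String) (b : Int) (t : String) (ht : t ∈ l) :
    l.foldl (fun b t => min b (pvRnk t)) b ≤ pvRnk t := by
  induction l generalizing b with
  | nil => cases ht
  | cons x xs ih =>
      simp only [List.foldl_cons]
      rcases List.mem_cons.mp ht with h | h
      · subst h
        exact le_trans (pvFold_le_init _ _) (min_le_right _ _)
      · exact ih _ h

-- ===== VERDICT (by name: the statement is the Claim_ definition above) =====
theorem get_primary_section_type_py_spec : Claim_equal_get_primary_section_type_py := by
  intro l _
  unfold Spec_get_primary_section_type_py get_primary_section_type_py get_primary_section_type_py_alt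
  simp only [List.contains_iff_mem]
  set best := l.foldl (fun b t => min b (pvRnk t)) 5 with hbest
  by_cases hc : "content" ∈ l
  · -- best = 0
    have h1 : best ≤ 0 := by
      have := pvFold_le_mem l 5 _ hc; rwa [pvRnk_eq] at this; 
    have h0 : 0 ≤ best :=
      pvFold_lb l 5 0 (by norm_num) (fun t _ => pvRnk_nonneg t)
    have hb0 : best = 0 := le_antisymm h1 h0
    simp [hc, hb0]
    decide
  · by_cases hp : "preface" ∈ l
    · have h1 : best ≤ 1 := by
        have := pvFold_le_mem l 5 _ hp; rwa [pvRnk_eq] at this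
      have h0 : 1 ≤ best := by
        refine pvFold_lb l 5 1 (by norm_num) (fun t ht => ?_)
        have n1 : t ≠ "content" := fun h => hc (h ▸ ht)
        rw [pvRnk_eq]
        simp only [if_neg n1]
        split_ifs <;> norm_num
      have hb : best = 1 := le_antisymm h1 h0
      simp [hc, hp, pvLoopA, hb]
      decide
    · by_cases ha : "abstract" ∈ l
      · have h1 : best ≤ 2 := by
          have := pvFold_le_mem l 5 _ ha; rwa [pvRnk_eq] at this
        have h0 : 2 ≤ best := by
          refine pvFold_lb l 5 2 (by norm_num) (fun t ht => ?_)
          have n1 : t ≠ "content" := fun h => hc (h ▸ ht)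
          have n2 : t ≠ "preface" := fun h => hp (h ▸ ht)
          rw [pvRnk_eq]
          simp only [if_neg n1, if_neg n2]
          split_ifs <;> norm_num
        have hb : best = 2 := le_antisymm h1 h0
        simp [hc, hp, ha, pvLoopA, hb]
        decide
      · by_cases hap : "appendix" ∈ l
        · have h1 : best ≤ 3 := by
            have := pvFold_le_mem l 5 _ hap; rwa [pvRnk_eq] at this
          have h0 : 3 ≤ best := by
            refine pvFold_lb l 5 3 (by norm_num) (fun t ht => ?_)
            have n1 : t ≠ "content" := fun h => hc (h ▸ ht)
            have n2 : t ≠ "preface" := fun h => hp (h ▸ ht)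
            have n3 : t ≠ "abstract" := fun h => ha (h ▸ ht)
            rw [pvRnk_eq]
            simp only [if_neg n1, if_neg n2, if_neg n3]
            split_ifs <;> norm_num
          have hb : best = 3 := le_antisymm h1 h0
          simp [hc, hp, ha, hap, pvLoopA, hb]
          decide
        · by_cases hf : "figures_tables_sources" ∈ l
          · have h1 : best ≤ 4 := by
              have := pvFold_le_mem l 5 _ hf; rwa [pvRnk_eq] at this
            have h0 : 4 ≤ best := by
              refine pvFold_lb l 5 4 (by norm_num) (fun t ht => ?_)
              have n1 : t ≠ "content" := fun h => hc (h ▸ ht)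
              have n2 : t ≠ "preface" := fun h => hp (h ▸ ht)
              have n3 : t ≠ "abstract" := fun h => ha (h ▸ ht)
              have n4 : t ≠ "appendix" := fun h => hap (h ▸ ht)
              rw [pvRnk_eq]
              simp only [if_neg n1, if_neg n2, if_neg n3, if_neg n4]
              split_ifs <;> norm_num
            have hb : best = 4 := le_antisymm h1 h0
            simp [hc, hp, ha, hap, hf, pvLoopA, hb]
            decide
          · -- no known type: best = 5, both fall back
            have h0 : 5 ≤ best := by
              refine pvFold_lb l 5 5 (le_refl _) (fun t ht => ?_)
              have n1 : t ≠ "content" := fun h => hc (h ▸ ht)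
              have n2 : t ≠ "preface" := fun h => hp (h ▸ ht)
              have n3 : t ≠ "abstract" := fun h => ha (h ▸ ht)
              have n4 : t ≠ "appendix" := fun h => hap (h ▸ ht)
              have n5 : t ≠ "figures_tables_sources" := fun h => hf (h ▸ ht)
              rw [pvRnk_eq]
              simp only [if_neg n1, if_neg n2, if_neg n3, if_neg n4, if_neg n5]
              norm_num
            have hb : ¬ best < 5 := not_lt.mpr h0
            simp [hc, hp, ha, hap, hf, pvLoopA, hb]
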